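/- GENERATED by mk_final_copies.py from the proof of the farm's unit `imdct_step3_iter0_loop.2` (farm:imdct_step3_iter0_loop.2.1: Proof.lean) as the
   re-elaboration sweep compiled it — do not edit. -/
import Asan.CheckWalk
import Vorbis.Spec.Units.imdct_step3_iter0_loop_2
open X86 X86.User Asan Vorbis Vorbis.Spec

set_option maxRecDepth 4000
set_option maxHeartbeats 4000000

/-- Segment 2 of `imdct_step3_iter0_loop` (`cut1` = 0x10500a … `cut2` = 0x1051b0: the first half of the loop body, quarters 0 and 1,
stb_vorbis_fixed.c:2444-2457; 86 instructions, 54 of them SSE, 12 `__asan_load4_noabort` checks, no branch): from the assertion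
`AtBody` (the loop invariant and `t < m`) to the assertion `AtMid` (the same at `cut2`).

* BEFORE THE WALK the invariant's pointer sums (`hee0`, `hee2`, `hA`) and `PairDown` are turned into plain bounds (`hb12`, `hbbx`,
  `hbbp`): the eight floats `r12[-7 .. 0]` and `rbx[-7 .. 0]` lie in the live `e[0 .. len)`, the floats `rbp[0 .. 25]` in the live `A`.
* THE WALK IS CUT AT THE RETURN OF EVERY CHECK (`ret1` … `ret12`), for one reason: a check's contract introduces `w_zmm` (the vector
  registers are kept), and from then on every SSE instruction DOUBLES that term (`zmm.set i (x ||| zmm[i] &&& …)`); one `u_walk`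
  over the whole segment does not end. After each check `w_zmm` is cleared (no assertion speaks of a vector register).
* EVERY CHECK GOAL is closed at object level: the address lies in the live range (`LiveBytes.accSmall`), and no store so far went
  to the shadow. That last fact is carried along as `hun<k>` over the LITERAL memory term of the stop, so that `v_untouched` only
  looks at the stores made since the last stop (or the one before: a return address pushed over the previous one replaces it).
* THE EXIT: `hsv` (the segment's own footprint, relative to `v`: `u_same`, once) gives the frame slots (`hstk`) and, through the
  carried `same`, the function's footprint; the pointers r12 rbx rbp r14 were never written (`w_kept`). -/
theorem Vorbis.Spec.Worked.imdct_step3_iter0_loop_2_ok : Vorbis.Spec.imdct_step3_iter0_loop_2.Statement := by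
  intro Lay hLay μ hμ u₀ hcode hload4 others frames len i0 koff ue ret t v hv
  obtain ⟨hrip, hloop, hlt⟩ := hv
  obtain ⟨hbody, hle, hcnt, hee0, hee2, hA⟩ := hloop
  obtain ⟨he, hpre, hcodeok, habi, hframe, hsame, hshadow⟩ := hbody
  obtain ⟨hrsp, sret, s15, s14, s13, s12, sbp, sbx⟩ := hframe
  -- the entry state's facts (`he_room`, `he_top`, … are about `ue`)
  have he0 := he
  have hpre0 := hpre
  v_entry he
  obtain ⟨hsh, hn31, hi0, hneg, hpair, hlive, hAlive⟩ := hpre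
  -- the present state's facts under the walker's names: DF / MXCSR / SseOK, the code span, the shadow untouched so far
  have hdf := habi.1
  have hmx := habi.2
  have hsse : SseOK v := sseOK_of_abiInv habi
  have w_eq : Mem.EqOn Vorbis.L.textLo Vorbis.L.textHi u₀.mem v.mem := hcodeok
  have hsp := hsh.rsp
  have hun0 : Mem.EqOn 0xC00000 0xE00000 ue.mem v.mem := hshadow
  -- where the two runs and the twiddle factors are: plain bounds for `u_omega`
  have hhi := hpair.hi
  have hlo := hpair.lo
  obtain ⟨hwe1, hwe2, _⟩ := hlive.where_ hsh.inv hsh.offText (by omega) (by omega)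
  have hAl := hAlive (by omega)
  obtain ⟨hwA1, hwA2, _⟩ := hAl.where_ hsh.inv hsh.offText (by omega) (by omega)
  have hb12 : (ue.reg .rsi).toNat + 28 ≤ (v.reg .r12).toNat ∧ (v.reg .r12).toNat + 4 ≤ (ue.reg .rsi).toNat + 4 * len := by omega
  have hbbx : (ue.reg .rsi).toNat + 28 ≤ (v.reg .rbx).toNat ∧ (v.reg .rbx).toNat + 4 ≤ (ue.reg .rsi).toNat + 4 * len := by omega
  have hbbp : (ue.reg .r8).toNat ≤ (v.reg .rbp).toNat ∧
      (v.reg .rbp).toNat + 104 ≤ (ue.reg .r8).toNat + 4 * (32 * quarter ue - 6) := by omega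
  -- 0x10500a = cut1 (stb_vorbis_fixed.c:2444): the walk, cut at the return of every check
  -- … 0x10500d: the check of `ee0[0]` (stb_vorbis_fixed.c:2444), on to its return `ret1`
  u_walk hcode [hμ.vendor] until [Vorbis.L.imdct_step3_iter0_loop.ret1] span [Vorbis.L.textLo, Vorbis.L.textHi] side (v_side)
  case check_10500d =>
    have hun : ShadowUntouched ue.mem s_10500d.mem := by
      v_untouched
    exact hlive.accSmall hsh.inv hun _ 4 (by decide) (by u_omega) (by u_omega)
  have hun1 : Mem.EqOn 0xC00000 0xE00000 ue.mem s_10500dr.mem := by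
    rw [w_mem]
    u_eqon
  rw [w_mem] at hun1
  try clear w_zmm
  -- … 0x105019: the check of `ee2[0]` (stb_vorbis_fixed.c:2444), on to its return `ret2`
  u_walk hcode [hμ.vendor] until [Vorbis.L.imdct_step3_iter0_loop.ret2] span [Vorbis.L.textLo, Vorbis.L.textHi] side (v_side)
  case check_105019 =>
    have hun : ShadowUntouched ue.mem s_105019.mem := by
      v_untouched
    exact hlive.accSmall hsh.inv hun _ 4 (by decide) (by u_omega) (by u_omega)
  have hun2 : Mem.EqOn 0xC00000 0xE00000 ue.mem s_105019r.mem := by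
    rw [w_mem]
    u_eqon
  rw [w_mem] at hun2
  try clear w_zmm
  -- … 0x10503c: the check of `ee0[-1]` (stb_vorbis_fixed.c:2445), on to its return `ret3`
  u_walk hcode [hμ.vendor] until [Vorbis.L.imdct_step3_iter0_loop.ret3] span [Vorbis.L.textLo, Vorbis.L.textHi] side (v_side)
  case check_10503c =>
    have hun : ShadowUntouched ue.mem s_10503c.mem := by
      v_untouched
    exact hlive.accSmall hsh.inv hun _ 4 (by decide) (by u_omega) (by u_omega)
  have hun3 : Mem.EqOn 0xC00000 0xE00000 ue.mem s_10503cr.mem := by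
    rw [w_mem]
    u_eqon
  rw [w_mem] at hun3
  try clear w_zmm
  -- … 0x10504a: the check of `ee2[-1]` (stb_vorbis_fixed.c:2445), on to its return `ret4`
  u_walk hcode [hμ.vendor] until [Vorbis.L.imdct_step3_iter0_loop.ret4] span [Vorbis.L.textLo, Vorbis.L.textHi] side (v_side)
  case check_10504a =>
    have hun : ShadowUntouched ue.mem s_10504a.mem := by
      v_untouched
    exact hlive.accSmall hsh.inv hun _ 4 (by decide) (by u_omega) (by u_omega)
  have hun4 : Mem.EqOn 0xC00000 0xE00000 ue.mem s_10504ar.mem := by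
    rw [w_mem]
    u_eqon
  rw [w_mem] at hun4
  try clear w_zmm
  -- … 0x105084: the check of `A[0]` (stb_vorbis_fixed.c:2448), on to its return `ret5`
  u_walk hcode [hμ.vendor] until [Vorbis.L.imdct_step3_iter0_loop.ret5] span [Vorbis.L.textLo, Vorbis.L.textHi] side (v_side)
  case check_105084 =>
    have hun : ShadowUntouched ue.mem s_105084.mem := by
      v_untouched
    exact hAl.accSmall hsh.inv hun _ 4 (by decide) (by u_omega) (by u_omega)
  have hun5 : Mem.EqOn 0xC00000 0xE00000 ue.mem s_105084r.mem := by
    rw [w_mem]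
    u_eqon
  rw [w_mem] at hun5
  try clear w_zmm
  -- … 0x10509d: the check of `A[1]` (stb_vorbis_fixed.c:2448), on to its return `ret6`
  u_walk hcode [hμ.vendor] until [Vorbis.L.imdct_step3_iter0_loop.ret6] span [Vorbis.L.textLo, Vorbis.L.textHi] side (v_side)
  case check_10509d =>
    have hun : ShadowUntouched ue.mem s_10509d.mem := by
      v_untouched
    exact hAl.accSmall hsh.inv hun _ 4 (by decide) (by u_omega) (by u_omega)
  have hun6 : Mem.EqOn 0xC00000 0xE00000 ue.mem s_10509dr.mem := by
    rw [w_mem]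
    u_eqon
  rw [w_mem] at hun6
  try clear w_zmm
  -- … 0x1050de: the check of `ee0[-2]` (stb_vorbis_fixed.c:2452), on to its return `ret7`
  u_walk hcode [hμ.vendor] until [Vorbis.L.imdct_step3_iter0_loop.ret7] span [Vorbis.L.textLo, Vorbis.L.textHi] side (v_side)
  case check_1050de =>
    have hun : ShadowUntouched ue.mem s_1050de.mem := by
      v_untouched
    exact hlive.accSmall hsh.inv hun _ 4 (by decide) (by u_omega) (by u_omega)
  have hun7 : Mem.EqOn 0xC00000 0xE00000 ue.mem s_1050der.mem := by
    rw [w_mem]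
    u_eqon
  rw [w_mem] at hun7
  try clear w_zmm
  -- … 0x1050ec: the check of `ee2[-2]` (stb_vorbis_fixed.c:2452), on to its return `ret8`
  u_walk hcode [hμ.vendor] until [Vorbis.L.imdct_step3_iter0_loop.ret8] span [Vorbis.L.textLo, Vorbis.L.textHi] side (v_side)
  case check_1050ec =>
    have hun : ShadowUntouched ue.mem s_1050ec.mem := by
      v_untouched
    exact hlive.accSmall hsh.inv hun _ 4 (by decide) (by u_omega) (by u_omega)
  have hun8 : Mem.EqOn 0xC00000 0xE00000 ue.mem s_1050ecr.mem := by
    rw [w_mem]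
    u_eqon
  rw [w_mem] at hun8
  try clear w_zmm
  -- … 0x105110: the check of `ee0[-3]` (stb_vorbis_fixed.c:2453), on to its return `ret9`
  u_walk hcode [hμ.vendor] until [Vorbis.L.imdct_step3_iter0_loop.ret9] span [Vorbis.L.textLo, Vorbis.L.textHi] side (v_side)
  case check_105110 =>
    have hun : ShadowUntouched ue.mem s_105110.mem := by
      v_untouched
    exact hlive.accSmall hsh.inv hun _ 4 (by decide) (by u_omega) (by u_omega)
  have hun9 : Mem.EqOn 0xC00000 0xE00000 ue.mem s_105110r.mem := by
    rw [w_mem]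
    u_eqon
  rw [w_mem] at hun9
  try clear w_zmm
  -- … 0x10511e: the check of `ee2[-3]` (stb_vorbis_fixed.c:2453), on to its return `ret10`
  u_walk hcode [hμ.vendor] until [Vorbis.L.imdct_step3_iter0_loop.ret10] span [Vorbis.L.textLo, Vorbis.L.textHi] side (v_side)
  case check_10511e =>
    have hun : ShadowUntouched ue.mem s_10511e.mem := by
      v_untouched
    exact hlive.accSmall hsh.inv hun _ 4 (by decide) (by u_omega) (by u_omega)
  have hun10 : Mem.EqOn 0xC00000 0xE00000 ue.mem s_10511er.mem := by
    rw [w_mem]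
    u_eqon
  rw [w_mem] at hun10
  try clear w_zmm
  -- … 0x10515a: the check of `A[8]` (stb_vorbis_fixed.c:2456), on to its return `ret11`
  u_walk hcode [hμ.vendor] until [Vorbis.L.imdct_step3_iter0_loop.ret11] span [Vorbis.L.textLo, Vorbis.L.textHi] side (v_side)
  case check_10515a =>
    have hun : ShadowUntouched ue.mem s_10515a.mem := by
      v_untouched
    exact hAl.accSmall hsh.inv hun _ 4 (by decide) (by u_omega) (by u_omega)
  have hun11 : Mem.EqOn 0xC00000 0xE00000 ue.mem s_10515ar.mem := by
    rw [w_mem]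
    u_eqon
  rw [w_mem] at hun11
  try clear w_zmm
  -- … 0x105173: the check of `A[9]` (stb_vorbis_fixed.c:2456), on to its return `ret12`
  u_walk hcode [hμ.vendor] until [Vorbis.L.imdct_step3_iter0_loop.ret12] span [Vorbis.L.textLo, Vorbis.L.textHi] side (v_side)
  case check_105173 =>
    have hun : ShadowUntouched ue.mem s_105173.mem := by
      v_untouched
    exact hAl.accSmall hsh.inv hun _ 4 (by decide) (by u_omega) (by u_omega)
  have hun12 : Mem.EqOn 0xC00000 0xE00000 ue.mem s_105173r.mem := by
    rw [w_mem]
    u_eqon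
  rw [w_mem] at hun12
  try clear w_zmm
  u_walk hcode [hμ.vendor] until [Vorbis.L.imdct_step3_iter0_loop.cut2] span [Vorbis.L.textLo, Vorbis.L.textHi] side (v_side)
  -- 0x1051b0 = cut2: the exit assertion `AtMid`
  have hfin : ShadowUntouched ue.mem s_1051ab.mem := by
    v_untouched
  -- what the segment wrote, relative to its own entry state `v`: the scratch floats and the return addresses of the checks
  -- in the frame, four floats of each run
  have hsv : Mem.SameExcept [⟨(ue.reg .rsp).toNat - 96, (ue.reg .rsp).toNat - 56⟩,
      ⟨(v.reg .r12).toNat - 12, (v.reg .r12).toNat + 4⟩,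
      ⟨(v.reg .rbx).toNat - 12, (v.reg .rbx).toNat + 4⟩] v.mem s_1051ab.mem := by
    u_same
  -- the save slots and the return address are off these windows
  obtain ⟨_, _, hwe3⟩ := hlive.where_ hsh.inv hsh.offText (by omega) (by omega)
  have hstk : Mem.EqOn ((ue.reg .rsp).toNat - 56) ((ue.reg .rsp).toNat + 8) v.mem s_1051ab.mem := by
    refine hsv.eqOn _ _ ?_
    intro w hw
    simp only [List.mem_cons, List.not_mem_nil, or_false] at hw
    rcases hw with rfl | rfl | rfl
    · simp only
      omega
    · simp only
      omega
    · simp only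
      omega
  simp only [X86.User.Spec.footprint, imdct_step3_iter0_loop.spec_frame, imdct_step3_iter0_loop.spec_writes] at hsame
  refine ReachVia.done ⟨w_rip, ⟨⟨he0, hpre0, w_eq, ?abi, ⟨w_rsp, ?_, ?_, ?_, ?_, ?_, ?_, ?_⟩, ?same, hfin⟩, hle, ?cnt, ?ee0, ?ee2, ?A⟩, hlt⟩
  case abi => v_inv
  case same =>
    simp only [X86.User.Spec.footprint, imdct_step3_iter0_loop.spec_frame, imdct_step3_iter0_loop.spec_writes]
    refine hsame.step_same' hsv ?_
    intro w hw
    simp only [List.mem_cons, List.not_mem_nil, or_false] at hw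
    rcases hw with rfl | rfl | rfl
    · right
      simp only [X86.User.inSpans_cons, X86.User.inSpans_nil, or_false]
      omega
    · right
      simp only [X86.User.inSpans_cons, X86.User.inSpans_nil, or_false]
      omega
    · right
      simp only [X86.User.inSpans_cons, X86.User.inSpans_nil, or_false]
      omega
  case cnt =>
    rw [w_kept .r14 rfl]
    exact hcnt
  case ee0 =>
    rw [w_kept .r12 rfl]
    exact hee0
  case ee2 =>
    rw [w_kept .rbx rfl]
    exact hee2
  case A =>
    rw [w_kept .rbp rfl]
    exact hA
  · exact Mem.ofNat_readLE_frame sret (hstk.mono (by u_omega) (by u_omega)) (by u_omega)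
  · exact Mem.ofNat_readLE_frame s15 (hstk.mono (by u_omega) (by u_omega)) (by u_omega)
  · exact Mem.ofNat_readLE_frame s14 (hstk.mono (by u_omega) (by u_omega)) (by u_omega)
  · exact Mem.ofNat_readLE_frame s13 (hstk.mono (by u_omega) (by u_omega)) (by u_omega)
  · exact Mem.ofNat_readLE_frame s12 (hstk.mono (by u_omega) (by u_omega)) (by u_omega)
  · exact Mem.ofNat_readLE_frame sbp (hstk.mono (by u_omega) (by u_omega)) (by u_omega)
  · exact Mem.ofNat_readLE_frame sbx (hstk.mono (by u_omega) (by u_omega)) (by u_omega)
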